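-- pv_equiv track=rewrite | github.com/pd95/AnonPDF | anon_pdf.py | _normalize_regex_whitespace
-- ===== SOURCE A (Python) =====
-- def _normalize_regex_whitespace(pattern: str) -> str:
--     out = []
--     in_class = False
--     escaped = False
--     i = 0
--     while i < len(pattern):
--         ch = pattern[i]
--         if escaped:
--             out.append(ch)
--             escaped = False
--             i += 1
--             continue
--         if ch == "\\":
--             out.append(ch)
--             escaped = True
--             i += 1
--             continue
--         if ch == "[":
--             in_class = True
--             out.append(ch)
--             i += 1
--             continue
--         if ch == "]" and in_class:
--             in_class = False
--             out.append(ch)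
--             i += 1
--             continue
--         if not in_class and ch in " \t\n\r\f\v":
--             while i + 1 < len(pattern) and pattern[i + 1] in " \t\n\r\f\v":
--                 i += 1
--             out.append(r"\s+")
--             i += 1
--             continue
--         out.append(ch)
--         i += 1
--     return "".join(out)
-- ===== SOURCE B (Python) =====
-- WS = " \t\n\r\f\v"
--
-- def _tokenize(pattern):
--     # one pass: escape-pairs (or a lone trailing backslash), whitespace runs, single chars
--     toks = []
--     i = 0
--     n = len(pattern)
--     while i < n:
--         c = pattern[i]
--         if c == "\\":
--             toks.append(pattern[i:i + 2])
--             i += 2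
--         elif c in WS:
--             j = i + 1
--             while j < n and pattern[j] in WS:
--                 j += 1
--             toks.append(pattern[i:j])
--             i = j
--         else:
--             toks.append(c)
--             i += 1
--     return toks
--
-- def _normalize_regex_whitespace(pattern: str) -> str:
--     out = []
--     in_class = False
--     for t in _tokenize(pattern):
--         if t == "[":
--             in_class = True
--             out.append(t)
--         elif t == "]" and in_class:
--             in_class = False
--             out.append(t)
--         elif t[0] in WS and not in_class:
--             out.append(r"\s+")
--         else:
--             out.append(t)
--     return "".join(out)
-- ===== Notes on version B (the rewrite author's own statement) =====
-- stated objective: alternative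
-- what changed: Replaces A's single index-driven scan with escaped/in_class flags and an inner whitespace-advancing while loop by a two-phase decomposition: tokenize the pattern once into escape-pairs, whitespace runs and single characters, then fold over the token list with only an in_class flag.
import Mathlib
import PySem

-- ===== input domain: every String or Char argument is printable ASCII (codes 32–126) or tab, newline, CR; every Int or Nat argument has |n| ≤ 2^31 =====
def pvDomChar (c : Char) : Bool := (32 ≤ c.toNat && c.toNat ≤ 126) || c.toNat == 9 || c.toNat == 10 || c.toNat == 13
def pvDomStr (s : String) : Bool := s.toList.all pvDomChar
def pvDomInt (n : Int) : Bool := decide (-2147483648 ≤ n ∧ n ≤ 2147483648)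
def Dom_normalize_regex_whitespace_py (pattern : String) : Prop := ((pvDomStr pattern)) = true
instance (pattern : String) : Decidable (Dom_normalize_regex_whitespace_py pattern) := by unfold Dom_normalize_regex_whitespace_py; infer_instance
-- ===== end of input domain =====

-- B replaces A's single stateful scan (escaped/in_class flags, inner whitespace-advancing
-- while) by a two-phase decomposition: tokenize into escape-pairs / whitespace runs /
-- single chars, then fold over tokens with only an in_class flag (objective: simpler).

-- ===== PORT A =====
-- ch in " \t\n\r\f\v"
def pvIsWs (c : Char) : Bool :=
  c = ' ' || c = '\t' || c = '\n' || c = '\r' || c = '\x0c' || c = '\x0b'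

-- A's inner `while i + 1 < len(pattern) and pattern[i+1] in WS: i += 1` (then i += 1):
-- skip the leading whitespace of what follows the current char
def pvSkipWsA : List Char → List Char
  | [] => []
  | c :: rest => if pvIsWs c then pvSkipWsA rest else c :: rest

theorem pvSkipWsA_length_le (l : List Char) : (pvSkipWsA l).length ≤ l.length := by
  induction l with
  | nil => simp [pvSkipWsA]
  | cons c rest ih => simp only [pvSkipWsA]; split <;> simp <;> omega

def pvLoopA : List Char → Bool → Bool → List Char
  | [], _, _ => []
  | c :: rest, inClass, escaped =>
    if escaped = true then c :: pvLoopA rest inClass false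
    else if c = '\\' then c :: pvLoopA rest inClass true
    else if c = '[' then c :: pvLoopA rest true escaped
    else if c = ']' ∧ inClass = true then c :: pvLoopA rest false escaped
    else if inClass = false ∧ pvIsWs c = true then
      '\\' :: 's' :: '+' :: pvLoopA (pvSkipWsA rest) inClass escaped
    else c :: pvLoopA rest inClass escaped
termination_by l _ _ => l.length
decreasing_by
  all_goals simp only [List.length_cons]
  · omega
  · omega
  · omega
  · omega
  · have := pvSkipWsA_length_le rest; omega
  · omega

def normalize_regex_whitespace_py (pattern : String) : String :=
  String.mk (pvLoopA pattern.toList false false)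

-- ===== PORT B =====
-- B's run scan `j = i+1; while j < n and pattern[j] in WS: j += 1` split as take/drop
def pvTakeWsB : List Char → List Char
  | [] => []
  | c :: rest => if pvIsWs c then c :: pvTakeWsB rest else []

def pvDropWsB : List Char → List Char
  | [] => []
  | c :: rest => if pvIsWs c then pvDropWsB rest else c :: rest

theorem pvDropWsB_length_le (l : List Char) : (pvDropWsB l).length ≤ l.length := by
  induction l with
  | nil => simp [pvDropWsB]
  | cons c rest ih => simp only [pvDropWsB]; split <;> simp <;> omega

-- B's _tokenize
def pvTokB : List Char → List (List Char)
  | [] => []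
  | c :: rest =>
    if c = '\\' then
      match rest with
      | [] => [[c]]                       -- pattern[i:i+2] on a lone trailing backslash
      | d :: rest' => [c, d] :: pvTokB rest'
    else if pvIsWs c then
      (c :: pvTakeWsB rest) :: pvTokB (pvDropWsB rest)
    else
      [c] :: pvTokB rest
termination_by l => l.length
decreasing_by
  all_goals simp only [List.length_cons]
  · omega
  · have := pvDropWsB_length_le rest; omega
  · omega

-- t[0] in WS (tokens produced by pvTokB are never empty)
def pvWsHead : List Char → Bool
  | [] => false
  | c :: _ => pvIsWs c

-- B's fold over the token list
def pvEmitB : List (List Char) → Bool → List Char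
  | [], _ => []
  | t :: ts, inClass =>
    if t = ['['] then t ++ pvEmitB ts true
    else if t = [']'] ∧ inClass = true then t ++ pvEmitB ts false
    else if pvWsHead t = true ∧ inClass = false then '\\' :: 's' :: '+' :: pvEmitB ts inClass
    else t ++ pvEmitB ts inClass

def normalize_regex_whitespace_py_alt (pattern : String) : String :=
  String.mk (pvEmitB (pvTokB pattern.toList) false)

-- ===== PRECONDITION & SPEC =====
def Spec_normalize_regex_whitespace_py (pattern : String) (out : String) : Prop := out = normalize_regex_whitespace_py_alt pattern
instance (pattern : String) (out : String) : Decidable (Spec_normalize_regex_whitespace_py pattern out) := by unfold Spec_normalize_regex_whitespace_py; infer_instance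

-- ===== CLAIM (what is proved, stated in full; the proofs are below) =====
def Claim_equal_normalize_regex_whitespace_py : Prop := ∀ (pattern : String), Dom_normalize_regex_whitespace_py pattern → Spec_normalize_regex_whitespace_py pattern (normalize_regex_whitespace_py pattern)

-- ===== LEMMAS AND PROOFS =====

theorem pvWs_ne (c : Char) (h : pvIsWs c = true) :
    c ≠ '\\' ∧ c ≠ '[' ∧ c ≠ ']' := by
  refine ⟨?_, ?_, ?_⟩ <;> rintro rfl <;> simp [pvIsWs] at h

-- equation lemmas for the two recursive ports
theorem pvLoopA_esc (c : Char) (rest : List Char) (inClass : Bool) :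
    pvLoopA (c :: rest) inClass true = c :: pvLoopA rest inClass false := by
  rw [pvLoopA.eq_def]; simp

theorem pvLoopA_bs (rest : List Char) (inClass : Bool) :
    pvLoopA ('\\' :: rest) inClass false = '\\' :: pvLoopA rest inClass true := by
  rw [pvLoopA.eq_def]; simp

theorem pvLoopA_lb (rest : List Char) (inClass : Bool) :
    pvLoopA ('[' :: rest) inClass false = '[' :: pvLoopA rest true false := by
  rw [pvLoopA.eq_def]; simp

theorem pvLoopA_rb_in (rest : List Char) :
    pvLoopA (']' :: rest) true false = ']' :: pvLoopA rest false false := by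
  rw [pvLoopA.eq_def]; simp

theorem pvLoopA_ws_out (c : Char) (rest : List Char) (hw : pvIsWs c = true) :
    pvLoopA (c :: rest) false false
      = '\\' :: 's' :: '+' :: pvLoopA (pvSkipWsA rest) false false := by
  obtain ⟨h1, h2, h3⟩ := pvWs_ne c hw
  rw [pvLoopA.eq_def]; simp [h1, h2, h3, hw]

theorem pvLoopA_ws_in (c : Char) (rest : List Char) (hw : pvIsWs c = true) :
    pvLoopA (c :: rest) true false = c :: pvLoopA rest true false := by
  obtain ⟨h1, h2, h3⟩ := pvWs_ne c hw
  rw [pvLoopA.eq_def]; simp [h1, h2, h3]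

theorem pvLoopA_other (c : Char) (rest : List Char) (inClass : Bool)
    (h1 : c ≠ '\\') (h2 : c ≠ '[') (h3 : c = ']' → inClass = false)
    (hw : pvIsWs c = false) :
    pvLoopA (c :: rest) inClass false = c :: pvLoopA rest inClass false := by
  rw [pvLoopA.eq_def]
  by_cases hc : c = ']'
  · subst hc; rw [h3 rfl]; simp [h1, h2, hw]
  · simp [h1, h2, hc, hw]

theorem pvTokB_bs_nil : pvTokB ['\\'] = [['\\']] := by
  rw [pvTokB.eq_def]; simp

theorem pvTokB_bs (d : Char) (rest : List Char) :
    pvTokB ('\\' :: d :: rest) = ['\\', d] :: pvTokB rest := by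
  rw [pvTokB.eq_def]; simp

theorem pvTokB_ws (c : Char) (rest : List Char) (h1 : c ≠ '\\') (hw : pvIsWs c = true) :
    pvTokB (c :: rest) = (c :: pvTakeWsB rest) :: pvTokB (pvDropWsB rest) := by
  rw [pvTokB.eq_def]; simp [h1, hw]

theorem pvTokB_other (c : Char) (rest : List Char) (h1 : c ≠ '\\') (hw : pvIsWs c = false) :
    pvTokB (c :: rest) = [c] :: pvTokB rest := by
  rw [pvTokB.eq_def]; simp [h1, hw]

theorem pvTakeWsB_mem (l : List Char) : ∀ c ∈ pvTakeWsB l, pvIsWs c = true := by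
  induction l with
  | nil => simp [pvTakeWsB]
  | cons c rest ih =>
    intro d hd
    simp only [pvTakeWsB] at hd
    split at hd
    · rcases List.mem_cons.1 hd with h | h
      · subst h; assumption
      · exact ih d h
    · simp at hd

theorem pvTake_drop_eq (l : List Char) : pvTakeWsB l ++ pvDropWsB l = l := by
  induction l with
  | nil => simp [pvTakeWsB, pvDropWsB]
  | cons c rest ih => simp only [pvTakeWsB, pvDropWsB]; split <;> simp [ih]

theorem pvDrop_eq_skip (l : List Char) : pvDropWsB l = pvSkipWsA l := by
  induction l with
  | nil => rfl
  | cons c rest ih => simp only [pvDropWsB, pvSkipWsA]; split <;> simp [ih]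

-- inside a class A copies a whitespace run char by char
theorem pvLoopA_ws_run (run : List Char) (rest : List Char)
    (h : ∀ c ∈ run, pvIsWs c = true) :
    pvLoopA (run ++ rest) true false = run ++ pvLoopA rest true false := by
  induction run with
  | nil => simp
  | cons c run' ih =>
    have hc := h c (List.mem_cons_self ..)
    rw [List.cons_append, pvLoopA_ws_in c _ hc,
      ih (fun d hd => h d (List.mem_cons_of_mem _ hd))]
    simp

theorem pvKey : ∀ (n : Nat) (l : List Char), l.length ≤ n → ∀ inClass,
    pvLoopA l inClass false = pvEmitB (pvTokB l) inClass := by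
  intro n
  induction n with
  | zero =>
    intro l hl inClass
    have : l = [] := by cases l <;> simp_all
    subst this
    rw [pvLoopA.eq_def, pvTokB.eq_def]; simp [pvEmitB]
  | succ n ih =>
    intro l hl inClass
    match l with
    | [] => rw [pvLoopA.eq_def, pvTokB.eq_def]; simp [pvEmitB]
    | c :: rest =>
      simp only [List.length_cons] at hl
      by_cases hb : c = '\\'
      · subst hb
        match rest with
        | [] =>
          rw [pvLoopA_bs, pvLoopA.eq_def, pvTokB_bs_nil]
          simp [pvEmitB, pvWsHead, pvIsWs]
        | d :: rest' =>
          simp only [List.length_cons] at hl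
          rw [pvLoopA_bs, pvLoopA_esc, pvTokB_bs]
          have : pvEmitB (['\\', d] :: pvTokB rest') inClass
              = '\\' :: d :: pvEmitB (pvTokB rest') inClass := by
            simp [pvEmitB, pvWsHead, pvIsWs]
          rw [this, ih rest' (by omega) inClass]
      · by_cases hw : pvIsWs c = true
        · obtain ⟨h1, h2, h3⟩ := pvWs_ne c hw
          have hdrop : (pvSkipWsA rest).length ≤ n := by
            have := pvSkipWsA_length_le rest; omega
          rw [pvTokB_ws c rest hb hw]
          cases inClass with
          | false =>
            rw [pvLoopA_ws_out c rest hw]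
            have : pvEmitB ((c :: pvTakeWsB rest) :: pvTokB (pvDropWsB rest)) false
                = '\\' :: 's' :: '+' :: pvEmitB (pvTokB (pvDropWsB rest)) false := by
              simp [pvEmitB, pvWsHead, hw, h2]
            rw [this, pvDrop_eq_skip, ih _ hdrop]
          | true =>
            have : pvEmitB ((c :: pvTakeWsB rest) :: pvTokB (pvDropWsB rest)) true
                = (c :: pvTakeWsB rest) ++ pvEmitB (pvTokB (pvDropWsB rest)) true := by
              have hne : c :: pvTakeWsB rest ≠ ['['] := by
                simp [h2]
              have hne2 : c :: pvTakeWsB rest ≠ [']'] := by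
                simp [h3]
              simp [pvEmitB, hne, hne2]
            rw [this]
            conv_lhs =>
              rw [show rest = pvTakeWsB rest ++ pvDropWsB rest from (pvTake_drop_eq rest).symm]
            rw [pvLoopA_ws_in c _ hw, pvDrop_eq_skip,
              pvLoopA_ws_run _ _ (pvTakeWsB_mem rest), ih _ hdrop]
            simp
        · simp only [Bool.not_eq_true] at hw
          rw [pvTokB_other c rest hb hw]
          by_cases h2 : c = '['
          · subst h2
            rw [pvLoopA_lb]
            have : pvEmitB (['['] :: pvTokB rest) inClass
                = '[' :: pvEmitB (pvTokB rest) true := by simp [pvEmitB]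
            rw [this, ih rest (by omega) true]
          · by_cases h3 : c = ']'
            · subst h3
              cases inClass with
              | true =>
                rw [pvLoopA_rb_in]
                have : pvEmitB ([']'] :: pvTokB rest) true
                    = ']' :: pvEmitB (pvTokB rest) false := by simp [pvEmitB]
                rw [this, ih rest (by omega) false]
              | false =>
                rw [pvLoopA_other ']' rest false hb h2 (fun _ => rfl) hw]
                have : pvEmitB ([']'] :: pvTokB rest) false
                    = ']' :: pvEmitB (pvTokB rest) false := by
                  simp [pvEmitB, pvWsHead, pvIsWs]
                rw [this, ih rest (by omega) false]
            · rw [pvLoopA_other c rest inClass hb h2 (fun hc => absurd hc h3) hw]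
              have : pvEmitB ([c] :: pvTokB rest) inClass
                  = c :: pvEmitB (pvTokB rest) inClass := by
                simp [pvEmitB, pvWsHead, hw, h2, h3]
              rw [this, ih rest (by omega) inClass]

-- ===== VERDICT (by name: the statement is the Claim_ definition above) =====
theorem normalize_regex_whitespace_py_spec : Claim_equal_normalize_regex_whitespace_py := by
  intro pattern _
  unfold Spec_normalize_regex_whitespace_py normalize_regex_whitespace_py normalize_regex_whitespace_py_alt
  rw [pvKey pattern.toList.length pattern.toList le_rfl false]
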